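-- pv_equiv track=rewrite | github.com/sonnekar/RiskClassification | project_USETHIS/snorkelfuncs.py | lf_keyword_frequency
-- ===== SOURCE A (Python) =====
-- def lf_keyword_frequency(report):
--     report = report['report']
--     keywords = [
--         "injury", "accident", "incident", "harm", "damage", "trauma", "wound", "casualty",
--         "fatality", "mishap", "disaster", "loss", "break", "shock", "collapse", "trauma",
--         "hit", "fall", "safety", "risk", "crash", "spill", "burn", "cut", "abrasion", "injured"
--     ]
--     count = sum(1 for word in report.lower().split() if word in keywords)
--     if count > 2:
--         return 3
--     elif count == 1:
--         return 2
--     return 0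
-- ===== SOURCE B (Python) =====
-- # B: outer loop over the deduplicated keyword set, counting each keyword's
-- # occurrences in the word list, instead of scanning the report with a membership test.
-- KEYWORDS = set(
--     "injury accident incident harm damage trauma wound casualty "
--     "fatality mishap disaster loss break shock collapse "
--     "hit fall safety risk crash spill burn cut abrasion injured".split()
-- )
--
-- def lf_keyword_frequency(report):
--     words = report['report'].lower().split()
--     count = sum(words.count(k) for k in KEYWORDS)
--     if count > 2:
--         return 3
--     if count == 1:
--         return 2
--     return 0
-- ===== Notes on version B (the rewrite author's own statement) =====
-- stated objective: idiomatic
-- what changed: B inverts the traversal: instead of one scan of the report testing each word against the (duplicate-carrying) keyword list, it loops over the deduplicated keyword set and sums each keyword's occurrence count in the word list.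
import Mathlib
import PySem

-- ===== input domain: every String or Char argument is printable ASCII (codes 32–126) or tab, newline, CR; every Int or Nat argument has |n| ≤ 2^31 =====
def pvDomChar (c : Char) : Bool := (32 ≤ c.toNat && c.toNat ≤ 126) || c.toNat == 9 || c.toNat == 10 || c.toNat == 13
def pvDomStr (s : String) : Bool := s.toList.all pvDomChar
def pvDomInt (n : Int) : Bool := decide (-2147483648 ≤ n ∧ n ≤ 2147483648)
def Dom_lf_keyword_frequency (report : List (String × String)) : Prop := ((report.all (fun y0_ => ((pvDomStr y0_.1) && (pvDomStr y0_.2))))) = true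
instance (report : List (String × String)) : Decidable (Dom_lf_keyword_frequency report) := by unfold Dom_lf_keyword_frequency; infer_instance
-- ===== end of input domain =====

-- B inverts the traversal (loop over the deduplicated keyword set, counting each keyword in the word list); equality of the return value is proved where the 'report' key exists.

-- ===== PORT A =====
def pvKwA : List String :=
  ["injury", "accident", "incident", "harm", "damage", "trauma", "wound", "casualty",
   "fatality", "mishap", "disaster", "loss", "break", "shock", "collapse", "trauma",
   "hit", "fall", "safety", "risk", "crash", "spill", "burn", "cut", "abrasion", "injured"]

def lf_keyword_frequency (report : List (String × String)) : Int :=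
  match PySem.Dict.get? (PySem.Dict.mk report) "report" with
  | none => 0   -- KeyError in Python; excluded by Pre_
  | some t =>
    let count : Int := ((PySem.Str.split₀ (PySem.Str.lower t)).countP (fun w => pvKwA.contains w) : Int)
    if count > 2 then 3 else if count == 1 then 2 else 0

-- ===== PORT B =====
def pvKwSet : List String :=
  PySem.Set.ofList (PySem.Str.split₀
    ("injury accident incident harm damage trauma wound casualty " ++
     "fatality mishap disaster loss break shock collapse " ++
     "hit fall safety risk crash spill burn cut abrasion injured"))

def lf_keyword_frequency_alt (report : List (String × String)) : Int :=
  match PySem.Dict.get? (PySem.Dict.mk report) "report" with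
  | none => 0   -- KeyError in Python; excluded by Pre_
  | some t =>
    let words := PySem.Str.split₀ (PySem.Str.lower t)
    let count : Int := (pvKwSet.map (fun k => ((words.count k : Nat) : Int))).sum
    if count > 2 then 3 else if count == 1 then 2 else 0

-- ===== PRECONDITION & SPEC =====
-- Pre_ excludes only inputs with no 'report' key, where the Python A raises KeyError.
def Pre_lf_keyword_frequency (report : List (String × String)) : Prop :=
  "report" ∈ report.map Prod.fst
instance (report : List (String × String)) : Decidable (Pre_lf_keyword_frequency report) := by
  unfold Pre_lf_keyword_frequency; infer_instance

def pvWitness_lf_keyword_frequency : (List (String × String)) := [("report", "a minor injury")]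

def Spec_lf_keyword_frequency (report : List (String × String)) (out : Int) : Prop := out = lf_keyword_frequency_alt report
instance (report : List (String × String)) (out : Int) : Decidable (Spec_lf_keyword_frequency report out) := by unfold Spec_lf_keyword_frequency; infer_instance

-- ===== CLAIM (what is proved, stated in full; the proofs are below) =====
def Claim_equal_lf_keyword_frequency : Prop := ∀ (report : List (String × String)), Dom_lf_keyword_frequency report → Pre_lf_keyword_frequency report → Spec_lf_keyword_frequency report (lf_keyword_frequency report)

-- ===== LEMMAS AND PROOFS =====

-- the deduplicated keyword set, as an explicit list
def pvKwL : List String :=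
  ["injury", "accident", "incident", "harm", "damage", "trauma", "wound", "casualty",
   "fatality", "mishap", "disaster", "loss", "break", "shock", "collapse",
   "hit", "fall", "safety", "risk", "crash", "spill", "burn", "cut", "abrasion", "injured"]

set_option maxRecDepth 8192 in
lemma pvKwSet_eq : pvKwSet = pvKwL := by decide

-- nodup list of keys: summing each key's multiplicity in ws counts exactly the ws-words that are keys
lemma sum_count_eq_countP (S : List String) (hnd : S.Nodup) (ws : List String) :
    (S.map (fun k => ws.count k)).sum = ws.countP (fun w => S.contains w) := by
  induction ws with
  | nil => simp
  | cons w ws ih =>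
    simp only [List.count_cons, List.countP_cons]
    rw [List.sum_map_add, ih, PySem.List.sum_map_ite_one_zero_nat (fun k => w == k) S]
    have hsymm : S.countP (fun k => w == k) = S.count w := by
      rw [List.count_eq_countP]
      apply List.countP_congr
      intro x _
      simp only [beq_iff_eq]
      exact eq_comm
    rw [hsymm]
    by_cases hw : w ∈ S
    · have hc : S.contains w = true := by simpa using hw
      rw [List.count_eq_one_of_mem hnd hw, if_pos hc]
    · have hc : ¬ (S.contains w = true) := by simpa using hw
      rw [List.count_eq_zero_of_not_mem hw, if_neg hc]

-- the keyword lists differ only by a duplicate "trauma": same membership predicate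
lemma mem_pvKwA_iff (w : String) : w ∈ pvKwA ↔ w ∈ pvKwL := by
  have hA : pvKwA = List.take 15 pvKwL ++ "trauma" :: List.drop 15 pvKwL := by rfl
  rw [hA, List.mem_append, List.mem_cons]
  constructor
  · rintro (h | h | h)
    · exact List.mem_of_mem_take h
    · exact h ▸ (by decide : ("trauma" : String) ∈ pvKwL)
    · exact List.mem_of_mem_drop h
  · intro h
    rw [← List.take_append_drop 15 pvKwL, List.mem_append] at h
    rcases h with h | h
    · exact Or.inl h
    · exact Or.inr (Or.inr h)

-- B's per-keyword counting sum equals A's filtered-scan count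
lemma countB_eq (ws : List String) :
    (pvKwSet.map (fun k => ((ws.count k : Nat) : Int))).sum
      = ((ws.countP (fun w => pvKwA.contains w) : Nat) : Int) := by
  have hcast : (pvKwSet.map (fun k => ((ws.count k : Nat) : Int))).sum
      = (((pvKwSet.map (fun k => ws.count k)).sum : Nat) : Int) := by
    rw [Nat.cast_list_sum, List.map_map]; rfl
  rw [hcast, pvKwSet_eq]
  have hnd : pvKwL.Nodup := by decide
  rw [sum_count_eq_countP pvKwL hnd ws]
  have hP : ws.countP (fun w => pvKwL.contains w) = ws.countP (fun w => pvKwA.contains w) := by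
    apply List.countP_congr
    intro x _
    simp [mem_pvKwA_iff x]
  rw [hP]

-- ===== VERDICT (by name: the statement is the Claim_ definition above) =====
theorem lf_keyword_frequency_spec : Claim_equal_lf_keyword_frequency := by
  intro report _ _
  unfold Spec_lf_keyword_frequency lf_keyword_frequency lf_keyword_frequency_alt
  cases PySem.Dict.get? (PySem.Dict.mk report) "report" with
  | none => rfl
  | some t =>
    simp only [countB_eq (PySem.Str.split₀ (PySem.Str.lower t))]
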